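/- GENERATED by mk_final_copies.py from the proof of the farm's unit `start_page_no_capturepattern` (farm:start_page_no_capturepattern.1: Proof.lean) as the
   re-elaboration sweep compiled it — do not edit. -/
import Asan.CheckWalk
import Vorbis.Spec.Units.start_page_no_capturepattern
import Vorbis.Spec.Worked.start_page_no_capturepattern_Lemmas

/-!
  `start_page_no_capturepattern` (stb_vorbis_fixed.c:1472–1522, 126 instructions) satisfies its contract.

  The function is cut at the return of each of its twelve contract calls, at the two loop heads and at three joins. Every segment is
  one lemma in continuation-passing form: from a state at the segment's first address that satisfies the invariant `SpncMid` (Lemmas.lean)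
  the machine reaches the function's `Returned`, GIVEN that it does so from every state at the segment's exits that satisfies the
  invariant again (`k…`). The theorem at the end plugs the segments together, last first.
-/

open X86 X86.User Asan Vorbis Vorbis.Spec

set_option maxRecDepth 100000
set_option maxHeartbeats 4000000

namespace Vorbis.Spec.start_page_no_capturepattern

variable {Lay : Layout} {μ : Microarch} {u₀ : State} {others : List Obj} {frames : List (Nat × FrameLayout)}
  {Blk : Block → Prop} {len : Nat} {u : State} {ret : Word}

/-- The entry `0x10c780` (stb_vorbis_fixed.c:1472): the five pushes, `mov rbx, rdi` and the check of `f->first_decode`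
(`f + 0x6d5`); at ret1 `0x10c797` the invariant `SpncMid` holds for the first time. -/
theorem seg0a (E : SpncEnv Lay μ u₀ others frames Blk len) (N : Ent Lay others frames Blk len u ret)
    (hrip : u.rip = Vorbis.L.start_page_no_capturepattern.entry)
    (he_retAddr : UInt64.ofNat (u.mem.readLE (u.reg .rsp) 8) = ret)
    (he_eq : Mem.EqOn Vorbis.L.textLo Vorbis.L.textHi u₀.mem u.mem)
    (he_df : u.flags .df = false) (he_mx : u.mxcsr &&& 0x1F80 = 0x1F80)
    (k : ∀ s', s'.rip = Vorbis.L.start_page_no_capturepattern.ret1 → SpncMid Blk len u₀ u s' ret →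
      SpncDone Lay μ u₀ others frames Blk len u ret s') :
    SpncDone Lay μ u₀ others frames Blk len u ret u := by
  obtain ⟨hLay, hμ, hcode, hload1, hgfo, hstore4, hget8, hstore1, hget32, hgetn, hload4, herror⟩ := E
  have ⟨he_ret_lt, he_align, he_room, he_top, he_stack, hrp, hpb⟩ := N
  have hsh := hrp.shadow
  have hsp := hsh.rsp
  have hwhere := hrp.where_obj
  have hobj := hrp.env.obj
  show ReachVia _ _ _ _ _
  u_walk hcode [hμ.vendor] until [Vorbis.L.start_page_no_capturepattern.ret1] span [Vorbis.L.textLo, Vorbis.L.textHi] side (v_side)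
  case check_10c792 =>
    -- the load of `first_decode`: inside `*f`
    have hun : ShadowUntouched u.mem s_10c792.mem := by v_untouched
    refine hobj.accSmall hsh.inv hun _ 1 (by decide) (by u_omega) ?_
    simp only [Vorbis.Off.sizeof.stb_vorbis]
    u_omega
  -- at ret1: the invariant, from the entry state
  have hf : (u.reg .rdi).toNat + 1808 ≤ 2 ^ 64 := by omega
  have hmx : s_10c792r.mxcsr &&& 0x1F80 = 0x1F80 := by
    rw [w_mxcsr]
    exact he_mx
  have hE : ∀ lo hi, (u.reg .rdi).toNat ≤ lo → hi ≤ (u.reg .rdi).toNat + 1808 → Mem.EqOn lo hi u.mem s_10c792r.mem := by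
    intro lo hi h1 h2
    rw [w_mem]
    u_eqon
  refine k s_10c792r w_rip ⟨⟨w_rbx, w_rsp, w_kept.mono_all (by rfl), w_eq, ?_, ?_, ?_, ?_, ?_, ?_, ?_, ?_, w_df_10c792, hmx⟩, ?_, ?_, ?_⟩
  · u_same
  · v_untouched
  · u_frame he_retAddr
  · u_resolve
  · u_resolve
  · u_resolve
  · u_resolve
  · u_resolve
  · refine hrp.bits.frame_fields ⟨hE _ _ (by omega) (by omega), hE _ _ (by omega) (by omega), hE _ _ (by omega) (by omega),
      hE _ _ (by omega) (by omega)⟩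
  · exact ns_of_eqOn hf (hE _ _ (by omega) (by omega))
  · exact Nat.le_of_eq (stream_of_eqOn hf (hE _ _ (by omega) (by omega))).symm

/-- ret1 `0x10c797` (stb_vorbis_fixed.c:1474 `if (f->first_decode && …)`): `cmp BYTE PTR [rbx+0x6d5], 0 ; je`; with
`first_decode` the call of line 1475 `stb_vorbis_get_file_offset(f)` (to cut1), else the call of line 1478 `get8(f)` (to cut2). -/
theorem seg0b (E : SpncEnv Lay μ u₀ others frames Blk len) (N : Ent Lay others frames Blk len u ret) (s : State)
    (hrip : s.rip = Vorbis.L.start_page_no_capturepattern.ret1) (M : SpncMid Blk len u₀ u s ret)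
    (k1 : ∀ s', s'.rip = Vorbis.L.start_page_no_capturepattern.cut1 → SpncMid Blk len u₀ u s' ret →
      SpncDone Lay μ u₀ others frames Blk len u ret s')
    (k2 : ∀ s', s'.rip = Vorbis.L.start_page_no_capturepattern.cut2 → SpncMid Blk len u₀ u s' ret →
      SpncDone Lay μ u₀ others frames Blk len u ret s') :
    SpncDone Lay μ u₀ others frames Blk len u ret s := by
  obtain ⟨hLay, hμ, hcode, hload1, hgfo, hstore4, hget8, hstore1, hget32, hgetn, hload4, herror⟩ := E
  have ⟨he_ret_lt, he_align, he_room, he_top, he_stack, hrp, hpb⟩ := N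
  have ⟨⟨m_rbx, m_rsp, m_kept, m_eq, m_same, m_un, m_s0, m_s1, m_s2, m_s3, m_s4, m_s5, m_df, m_mx⟩, m_bits, m_ns, m_st⟩ := M
  have hsh := hrp.shadow
  have hsp := hsh.rsp
  have hwhere := hrp.where_obj
  have hobj := hrp.env.obj
  show ReachVia _ _ _ _ _
  u_walk hcode [hμ.vendor] span [Vorbis.L.textLo, Vorbis.L.textHi] side (v_side)
  case call_inv => v_inv
  case call_inv => v_inv
  case pre_10c7ba =>
    refine callee_pre N (by v_untouched) w_rsp w_rdi ?_
    rw [w_mem]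
    exact bits_call N m_bits _
  case pre_10c7a3 =>
    refine ⟨callee_shadow N (by v_untouched) w_rsp, ?_⟩
    rw [w_rdi]
    exact hrp.objLive
  · -- `first_decode = 0`: after the return of get8 at cut2
    v_after_call w_rsp_10c7ba w_mem_10c7ba
    have hf : (u.reg .rdi).toNat + 1808 ≤ 2 ^ 64 := by omega
    have hpost : Get8Post Blk len (u.reg .rdi).toNat s_10c7ba s_10c7bar := by
      have h := w_post
      simp only [get8.spec, w_rdi_10c7ba] at h
      exact h
    have hst : stb_vorbis.stream s.mem (u.reg .rdi).toNat ≤ stb_vorbis.stream s_10c7bar.mem (u.reg .rdi).toNat := by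
      have h1 := hpost.stream_le.1
      have h2 : stb_vorbis.stream s_10c7ba.mem (u.reg .rdi).toNat = stb_vorbis.stream s.mem (u.reg .rdi).toNat := by
        apply stream_of_eqOn hf
        rw [w_mem_10c7ba]
        u_eqon
      omega
    refine k2 s_10c7bar w_rip (SpncMid.step N M ?_ w_rbx w_rsp (w_kept.mono_all (by rfl)) w_eq w_df w_mx hpost.reader.bits hst)
    u_same
  · -- `first_decode ≠ 0`: after the return of stb_vorbis_get_file_offset at cut1 (it writes nothing but stack)
    v_after_call w_rsp_10c7a3 w_mem_10c7a3
    have hf : (u.reg .rdi).toNat + 1808 ≤ 2 ^ 64 := by omega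
    have hb : Bits Blk len s_10c7a3r.mem (u.reg .rdi).toNat := by
      refine m_bits.frame_fields ⟨?_, ?_, ?_, ?_⟩
      · u_eqon
      · u_eqon
      · u_eqon
      · u_eqon
    have hst : stb_vorbis.stream s.mem (u.reg .rdi).toNat ≤ stb_vorbis.stream s_10c7a3r.mem (u.reg .rdi).toNat := by
      refine Nat.le_of_eq (stream_of_eqOn hf ?_).symm
      u_eqon
    refine k1 s_10c7a3r w_rip (SpncMid.step N M ?_ w_rbx w_rsp (w_kept.mono_all (by rfl)) w_eq w_df w_mx hb hst)
    u_same

/-- cut1 `0x10c7a8` (stb_vorbis_fixed.c:1475 `stb_vorbis_get_file_offset(f)` returned): the checked store of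
`f->p_first.page_start` at `f + 0x54`, then the call of line 1478 `get8(f)`. -/
theorem seg1 (E : SpncEnv Lay μ u₀ others frames Blk len) (N : Ent Lay others frames Blk len u ret) (s : State)
    (hrip : s.rip = Vorbis.L.start_page_no_capturepattern.cut1) (M : SpncMid Blk len u₀ u s ret)
    (k : ∀ s', s'.rip = Vorbis.L.start_page_no_capturepattern.cut2 → SpncMid Blk len u₀ u s' ret →
      SpncDone Lay μ u₀ others frames Blk len u ret s') :
    SpncDone Lay μ u₀ others frames Blk len u ret s := by
  obtain ⟨hLay, hμ, hcode, hload1, hgfo, hstore4, hget8, hstore1, hget32, hgetn, hload4, herror⟩ := E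
  have ⟨he_ret_lt, he_align, he_room, he_top, he_stack, hrp, hpb⟩ := N
  have ⟨⟨m_rbx, m_rsp, m_kept, m_eq, m_same, m_un, m_s0, m_s1, m_s2, m_s3, m_s4, m_s5, m_df, m_mx⟩, m_bits, m_ns, m_st⟩ := M
  have hsh := hrp.shadow
  have hsp := hsh.rsp
  have hwhere := hrp.where_obj
  have hobj := hrp.env.obj
  show ReachVia _ _ _ _ _
  u_walk hcode [hμ.vendor] span [Vorbis.L.textLo, Vorbis.L.textHi] side (v_side)
  case check_10c7af =>
    -- the store of `p_first.page_start`: inside `*f`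
    have hun : ShadowUntouched u.mem s_10c7af.mem := by v_untouched
    refine hobj.accSmall hsh.inv hun _ 4 (by decide) (by u_omega) ?_
    simp only [Vorbis.Off.sizeof.stb_vorbis]
    u_omega
  case call_inv => v_inv
  case pre_10c7ba =>
    refine callee_pre N (by v_untouched) w_rsp w_rdi ?_
    refine m_bits.frame_fields ⟨?_, ?_, ?_, ?_⟩
    · rw [w_mem]
      u_eqon
    · rw [w_mem]
      u_eqon
    · rw [w_mem]
      u_eqon
    · rw [w_mem]
      u_eqon
  -- after the return of get8: the invariant again
  v_after_call w_rsp_10c7ba w_mem_10c7ba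
  have hf : (u.reg .rdi).toNat + 1808 ≤ 2 ^ 64 := by omega
  have hpost : Get8Post Blk len (u.reg .rdi).toNat s_10c7ba s_10c7bar := by
    have h := w_post
    simp only [get8.spec, w_rdi_10c7ba] at h
    exact h
  have hst : stb_vorbis.stream s.mem (u.reg .rdi).toNat ≤ stb_vorbis.stream s_10c7bar.mem (u.reg .rdi).toNat := by
    have h1 := hpost.stream_le.1
    have h2 : stb_vorbis.stream s_10c7ba.mem (u.reg .rdi).toNat = stb_vorbis.stream s.mem (u.reg .rdi).toNat := by
      apply stream_of_eqOn hf
      rw [w_mem_10c7ba]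
      u_eqon
    omega
  refine k s_10c7bar w_rip (SpncMid.step N M ?_ w_rbx w_rsp (w_kept.mono_all (by rfl)) w_eq w_df w_mx hpost.reader.bits hst)
  u_same

/-- cut2 `0x10c7bf` (stb_vorbis_fixed.c:1478 `if (0 != get8(f)) return error(f, …)`): `test al, al ; jne`; on the error arm the
call of `error(f, 31)` and the exit join with eax = 0; else the call of line 1480 `get8(f)`. -/
theorem seg2 (E : SpncEnv Lay μ u₀ others frames Blk len) (N : Ent Lay others frames Blk len u ret) (s : State)
    (hrip : s.rip = Vorbis.L.start_page_no_capturepattern.cut2) (M : SpncMid Blk len u₀ u s ret)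
    (k : ∀ s', s'.rip = Vorbis.L.start_page_no_capturepattern.cut3 → SpncMid Blk len u₀ u s' ret →
      SpncDone Lay μ u₀ others frames Blk len u ret s')
    (kerr : ∀ s', (s'.rip = Vorbis.L.start_page_no_capturepattern.cut12 ∨
        s'.rip = Vorbis.L.start_page_no_capturepattern.cut13) → SpncMid Blk len u₀ u s' ret → s'.reg .rax = 0 →
      SpncDone Lay μ u₀ others frames Blk len u ret s') :
    SpncDone Lay μ u₀ others frames Blk len u ret s := by
  obtain ⟨hLay, hμ, hcode, hload1, hgfo, hstore4, hget8, hstore1, hget32, hgetn, hload4, herror⟩ := E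
  have ⟨he_ret_lt, he_align, he_room, he_top, he_stack, hrp, hpb⟩ := N
  have ⟨⟨m_rbx, m_rsp, m_kept, m_eq, m_same, m_un, m_s0, m_s1, m_s2, m_s3, m_s4, m_s5, m_df, m_mx⟩, m_bits, m_ns, m_st⟩ := M
  have hsh := hrp.shadow
  have hsp := hsh.rsp
  have hwhere := hrp.where_obj
  have hobj := hrp.env.obj
  show ReachVia _ _ _ _ _
  u_walk hcode [hμ.vendor] until [join3] span [Vorbis.L.textLo, Vorbis.L.textHi] side (v_side)
  case call_inv => v_inv
  case call_inv => v_inv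
  case pre_10c8bb =>
    refine ⟨callee_shadow N (by v_untouched) w_rsp, ?_⟩
    rw [w_rdi]
    exact hobj
  case pre_10c7ca =>
    refine callee_pre N (by v_untouched) w_rsp w_rdi ?_
    rw [w_mem]
    exact bits_call N m_bits _
  · -- the error arm, after the return of `error(f, 31)` at cut12: eax = 0, only `f->error` changed
    v_after_call w_rsp_10c8bb w_mem_10c8bb
    have hf : (u.reg .rdi).toNat + 1808 ≤ 2 ^ 64 := by omega
    have hrax : s_10c8bbr.reg .rax = 0 := w_post.1
    have hb : Bits Blk len s_10c8bbr.mem (u.reg .rdi).toNat := by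
      refine m_bits.frame_fields ⟨?_, ?_, ?_, ?_⟩
      · u_eqon
      · u_eqon
      · u_eqon
      · u_eqon
    have hst : stb_vorbis.stream s.mem (u.reg .rdi).toNat ≤ stb_vorbis.stream s_10c8bbr.mem (u.reg .rdi).toNat := by
      refine Nat.le_of_eq (stream_of_eqOn hf ?_).symm
      u_eqon
    refine kerr s_10c8bbr (Or.inl w_rip) (SpncMid.step N M ?_ w_rbx w_rsp (w_kept.mono_all (by rfl)) w_eq w_df w_mx hb hst) hrax
    u_same
  · -- after the return of get8 at cut3: the invariant again
    v_after_call w_rsp_10c7ca w_mem_10c7ca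
    have hf : (u.reg .rdi).toNat + 1808 ≤ 2 ^ 64 := by omega
    have hpost : Get8Post Blk len (u.reg .rdi).toNat s_10c7ca s_10c7car := by
      have h := w_post
      simp only [get8.spec, w_rdi_10c7ca] at h
      exact h
    have hst : stb_vorbis.stream s.mem (u.reg .rdi).toNat ≤ stb_vorbis.stream s_10c7car.mem (u.reg .rdi).toNat := by
      have h1 := hpost.stream_le.1
      have h2 : stb_vorbis.stream s_10c7ca.mem (u.reg .rdi).toNat = stb_vorbis.stream s.mem (u.reg .rdi).toNat := by
        apply stream_of_eqOn hf
        rw [w_mem_10c7ca]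
        u_eqon
      omega
    refine k s_10c7car w_rip (SpncMid.step N M ?_ w_rbx w_rsp (w_kept.mono_all (by rfl)) w_eq w_df w_mx hpost.reader.bits hst)
    u_same

/-- cut3 `0x10c7cf` (stb_vorbis_fixed.c:1480 `f->page_flag = get8(f)` returned): the checked byte store at `f + 0x6d3`, then the
call of line 1482 `loc0 = get32(f)`. -/
theorem seg3 (E : SpncEnv Lay μ u₀ others frames Blk len) (N : Ent Lay others frames Blk len u ret) (s : State)
    (hrip : s.rip = Vorbis.L.start_page_no_capturepattern.cut3) (M : SpncMid Blk len u₀ u s ret)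
    (k : ∀ s', s'.rip = Vorbis.L.start_page_no_capturepattern.cut4 → SpncMid Blk len u₀ u s' ret →
      SpncDone Lay μ u₀ others frames Blk len u ret s') :
    SpncDone Lay μ u₀ others frames Blk len u ret s := by
  obtain ⟨hLay, hμ, hcode, hload1, hgfo, hstore4, hget8, hstore1, hget32, hgetn, hload4, herror⟩ := E
  have ⟨he_ret_lt, he_align, he_room, he_top, he_stack, hrp, hpb⟩ := N
  have ⟨⟨m_rbx, m_rsp, m_kept, m_eq, m_same, m_un, m_s0, m_s1, m_s2, m_s3, m_s4, m_s5, m_df, m_mx⟩, m_bits, m_ns, m_st⟩ := M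
  have hsh := hrp.shadow
  have hsp := hsh.rsp
  have hwhere := hrp.where_obj
  have hobj := hrp.env.obj
  show ReachVia _ _ _ _ _
  u_walk hcode [hμ.vendor] span [Vorbis.L.textLo, Vorbis.L.textHi] side (v_side)
  case check_10c7d8 =>
    -- the store of `page_flag`: inside `*f`
    have hun : ShadowUntouched u.mem s_10c7d8.mem := by v_untouched
    refine hobj.accSmall hsh.inv hun _ 1 (by decide) (by u_omega) ?_
    simp only [Vorbis.Off.sizeof.stb_vorbis]
    u_omega
  case call_inv => v_inv
  case pre_10c7e7 =>
    refine callee_pre N (by v_untouched) w_rsp w_rdi ?_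
    refine m_bits.frame_fields ⟨?_, ?_, ?_, ?_⟩
    · rw [w_mem]
      u_eqon
    · rw [w_mem]
      u_eqon
    · rw [w_mem]
      u_eqon
    · rw [w_mem]
      u_eqon
  -- after the return of get32: the invariant again
  v_after_call w_rsp_10c7e7 w_mem_10c7e7
  have hf : (u.reg .rdi).toNat + 1808 ≤ 2 ^ 64 := by omega
  have hpost : Get32Post Blk len (u.reg .rdi).toNat s_10c7e7 s_10c7e7r := by
    have h := w_post
    simp only [get32.spec, w_rdi_10c7e7] at h
    exact h
  have hst : stb_vorbis.stream s.mem (u.reg .rdi).toNat ≤ stb_vorbis.stream s_10c7e7r.mem (u.reg .rdi).toNat := by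
    have h1 := hpost.stream_le.1
    have h2 : stb_vorbis.stream s_10c7e7.mem (u.reg .rdi).toNat = stb_vorbis.stream s.mem (u.reg .rdi).toNat := by
      apply stream_of_eqOn hf
      rw [w_mem_10c7e7]
      u_eqon
    omega
  refine k s_10c7e7r w_rip (SpncMid.step N M ?_ w_rbx w_rsp (w_kept.mono_all (by rfl)) w_eq w_df w_mx hpost.reader.bits hst)
  u_same

/-- cut4 `0x10c7ec` (stb_vorbis_fixed.c:1482 `loc0 = get32(f)` returned): `mov r13d, eax`, then the call of line 1483 `loc1 = get32(f)`. -/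
theorem seg4 (E : SpncEnv Lay μ u₀ others frames Blk len) (N : Ent Lay others frames Blk len u ret) (s : State)
    (hrip : s.rip = Vorbis.L.start_page_no_capturepattern.cut4) (M : SpncMid Blk len u₀ u s ret)
    (k : ∀ s', s'.rip = Vorbis.L.start_page_no_capturepattern.cut5 → SpncMid Blk len u₀ u s' ret →
      SpncDone Lay μ u₀ others frames Blk len u ret s') :
    SpncDone Lay μ u₀ others frames Blk len u ret s := by
  obtain ⟨hLay, hμ, hcode, hload1, hgfo, hstore4, hget8, hstore1, hget32, hgetn, hload4, herror⟩ := E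
  have ⟨he_ret_lt, he_align, he_room, he_top, he_stack, hrp, hpb⟩ := N
  have ⟨⟨m_rbx, m_rsp, m_kept, m_eq, m_same, m_un, m_s0, m_s1, m_s2, m_s3, m_s4, m_s5, m_df, m_mx⟩, m_bits, m_ns, m_st⟩ := M
  have hsh := hrp.shadow
  have hsp := hsh.rsp
  have hwhere := hrp.where_obj
  show ReachVia _ _ _ _ _
  u_walk hcode [hμ.vendor] span [Vorbis.L.textLo, Vorbis.L.textHi] side (v_side)
  case call_inv => v_inv
  case pre_10c7f2 =>
    refine callee_pre N (by v_untouched) w_rsp w_rdi ?_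
    rw [w_mem]
    exact bits_call N m_bits _
  -- after the return of get32: the invariant again
  v_after_call w_rsp_10c7f2 w_mem_10c7f2
  have hf : (u.reg .rdi).toNat + 1808 ≤ 2 ^ 64 := by omega
  have hpost : Get32Post Blk len (u.reg .rdi).toNat s_10c7f2 s_10c7f2r := by
    have h := w_post
    simp only [get32.spec, w_rdi_10c7f2] at h
    exact h
  have hst : stb_vorbis.stream s.mem (u.reg .rdi).toNat ≤ stb_vorbis.stream s_10c7f2r.mem (u.reg .rdi).toNat := by
    have h1 := hpost.stream_le.1
    have h2 : stb_vorbis.stream s_10c7f2.mem (u.reg .rdi).toNat = stb_vorbis.stream s.mem (u.reg .rdi).toNat := by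
      apply stream_of_eqOn hf
      rw [w_mem_10c7f2]
      u_eqon
    omega
  refine k s_10c7f2r w_rip (SpncMid.step N M ?_ w_rbx w_rsp (w_kept.mono_all (by rfl)) w_eq w_df w_mx hpost.reader.bits hst)
  u_same

/-- cut5 `0x10c7f7` (stb_vorbis_fixed.c:1483 `loc1 = get32(f)` returned): `mov ebp, eax`, then the call of line 1486 `get32(f)`. -/
theorem seg5 (E : SpncEnv Lay μ u₀ others frames Blk len) (N : Ent Lay others frames Blk len u ret) (s : State)
    (hrip : s.rip = Vorbis.L.start_page_no_capturepattern.cut5) (M : SpncMid Blk len u₀ u s ret)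
    (k : ∀ s', s'.rip = Vorbis.L.start_page_no_capturepattern.cut6 → SpncMid Blk len u₀ u s' ret →
      SpncDone Lay μ u₀ others frames Blk len u ret s') :
    SpncDone Lay μ u₀ others frames Blk len u ret s := by
  obtain ⟨hLay, hμ, hcode, hload1, hgfo, hstore4, hget8, hstore1, hget32, hgetn, hload4, herror⟩ := E
  have ⟨he_ret_lt, he_align, he_room, he_top, he_stack, hrp, hpb⟩ := N
  have ⟨⟨m_rbx, m_rsp, m_kept, m_eq, m_same, m_un, m_s0, m_s1, m_s2, m_s3, m_s4, m_s5, m_df, m_mx⟩, m_bits, m_ns, m_st⟩ := M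
  have hsh := hrp.shadow
  have hsp := hsh.rsp
  have hwhere := hrp.where_obj
  show ReachVia _ _ _ _ _
  u_walk hcode [hμ.vendor] span [Vorbis.L.textLo, Vorbis.L.textHi] side (v_side)
  case call_inv => v_inv
  case pre_10c7fc =>
    refine callee_pre N (by v_untouched) w_rsp w_rdi ?_
    rw [w_mem]
    exact bits_call N m_bits _
  -- after the return of get32: the invariant again
  v_after_call w_rsp_10c7fc w_mem_10c7fc
  have hf : (u.reg .rdi).toNat + 1808 ≤ 2 ^ 64 := by omega
  have hpost : Get32Post Blk len (u.reg .rdi).toNat s_10c7fc s_10c7fcr := by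
    have h := w_post
    simp only [get32.spec, w_rdi_10c7fc] at h
    exact h
  have hst : stb_vorbis.stream s.mem (u.reg .rdi).toNat ≤ stb_vorbis.stream s_10c7fcr.mem (u.reg .rdi).toNat := by
    have h1 := hpost.stream_le.1
    have h2 : stb_vorbis.stream s_10c7fc.mem (u.reg .rdi).toNat = stb_vorbis.stream s.mem (u.reg .rdi).toNat := by
      apply stream_of_eqOn hf
      rw [w_mem_10c7fc]
      u_eqon
    omega
  refine k s_10c7fcr w_rip (SpncMid.step N M ?_ w_rbx w_rsp (w_kept.mono_all (by rfl)) w_eq w_df w_mx hpost.reader.bits hst)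
  u_same

/-- cut6 `0x10c801` (stb_vorbis_fixed.c:1486 `get32(f)` returned): the call of line 1489 `n = get32(f)`. -/
theorem seg6 (E : SpncEnv Lay μ u₀ others frames Blk len) (N : Ent Lay others frames Blk len u ret) (s : State)
    (hrip : s.rip = Vorbis.L.start_page_no_capturepattern.cut6) (M : SpncMid Blk len u₀ u s ret)
    (k : ∀ s', s'.rip = Vorbis.L.start_page_no_capturepattern.cut7 → SpncMid Blk len u₀ u s' ret →
      SpncDone Lay μ u₀ others frames Blk len u ret s') :
    SpncDone Lay μ u₀ others frames Blk len u ret s := by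
  obtain ⟨hLay, hμ, hcode, hload1, hgfo, hstore4, hget8, hstore1, hget32, hgetn, hload4, herror⟩ := E
  have ⟨he_ret_lt, he_align, he_room, he_top, he_stack, hrp, hpb⟩ := N
  have ⟨⟨m_rbx, m_rsp, m_kept, m_eq, m_same, m_un, m_s0, m_s1, m_s2, m_s3, m_s4, m_s5, m_df, m_mx⟩, m_bits, m_ns, m_st⟩ := M
  have hsh := hrp.shadow
  have hsp := hsh.rsp
  have hwhere := hrp.where_obj
  show ReachVia _ _ _ _ _
  u_walk hcode [hμ.vendor] span [Vorbis.L.textLo, Vorbis.L.textHi] side (v_side)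
  case call_inv => v_inv
  case pre_10c804 =>
    refine callee_pre N (by v_untouched) w_rsp w_rdi ?_
    rw [w_mem]
    exact bits_call N m_bits _
  -- after the return of get32: the invariant again
  v_after_call w_rsp_10c804 w_mem_10c804
  have hf : (u.reg .rdi).toNat + 1808 ≤ 2 ^ 64 := by omega
  have hpost : Get32Post Blk len (u.reg .rdi).toNat s_10c804 s_10c804r := by
    have h := w_post
    simp only [get32.spec, w_rdi_10c804] at h
    exact h
  have hst : stb_vorbis.stream s.mem (u.reg .rdi).toNat ≤ stb_vorbis.stream s_10c804r.mem (u.reg .rdi).toNat := by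
    have h1 := hpost.stream_le.1
    have h2 : stb_vorbis.stream s_10c804.mem (u.reg .rdi).toNat = stb_vorbis.stream s.mem (u.reg .rdi).toNat := by
      apply stream_of_eqOn hf
      rw [w_mem_10c804]
      u_eqon
    omega
  refine k s_10c804r w_rip (SpncMid.step N M ?_ w_rbx w_rsp (w_kept.mono_all (by rfl)) w_eq w_df w_mx hpost.reader.bits hst)
  u_same

/-- cut7 `0x10c809` (stb_vorbis_fixed.c:1489 `n = get32(f)` returned): line 1490 `f->last_page = n`, the checked store at
`f + 0x5cc`, then the call of line 1492 `get32(f)`. -/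
theorem seg7 (E : SpncEnv Lay μ u₀ others frames Blk len) (N : Ent Lay others frames Blk len u ret) (s : State)
    (hrip : s.rip = Vorbis.L.start_page_no_capturepattern.cut7) (M : SpncMid Blk len u₀ u s ret)
    (k : ∀ s', s'.rip = Vorbis.L.start_page_no_capturepattern.cut8 → SpncMid Blk len u₀ u s' ret →
      SpncDone Lay μ u₀ others frames Blk len u ret s') :
    SpncDone Lay μ u₀ others frames Blk len u ret s := by
  obtain ⟨hLay, hμ, hcode, hload1, hgfo, hstore4, hget8, hstore1, hget32, hgetn, hload4, herror⟩ := E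
  have ⟨he_ret_lt, he_align, he_room, he_top, he_stack, hrp, hpb⟩ := N
  have ⟨⟨m_rbx, m_rsp, m_kept, m_eq, m_same, m_un, m_s0, m_s1, m_s2, m_s3, m_s4, m_s5, m_df, m_mx⟩, m_bits, m_ns, m_st⟩ := M
  have hsh := hrp.shadow
  have hsp := hsh.rsp
  have hwhere := hrp.where_obj
  have hobj := hrp.env.obj
  show ReachVia _ _ _ _ _
  u_walk hcode [hμ.vendor] span [Vorbis.L.textLo, Vorbis.L.textHi] side (v_side)
  case check_10c813 =>
    -- the store of `last_page`: inside `*f`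
    have hun : ShadowUntouched u.mem s_10c813.mem := by v_untouched
    refine hobj.accSmall hsh.inv hun _ 4 (by decide) (by u_omega) ?_
    simp only [Vorbis.Off.sizeof.stb_vorbis]
    u_omega
  case call_inv => v_inv
  case pre_10c822 =>
    refine callee_pre N (by v_untouched) w_rsp w_rdi ?_
    refine m_bits.frame_fields ⟨?_, ?_, ?_, ?_⟩
    · rw [w_mem]
      u_eqon
    · rw [w_mem]
      u_eqon
    · rw [w_mem]
      u_eqon
    · rw [w_mem]
      u_eqon
  -- after the return of get32: the invariant again
  v_after_call w_rsp_10c822 w_mem_10c822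
  have hf : (u.reg .rdi).toNat + 1808 ≤ 2 ^ 64 := by omega
  have hpost : Get32Post Blk len (u.reg .rdi).toNat s_10c822 s_10c822r := by
    have h := w_post
    simp only [get32.spec, w_rdi_10c822] at h
    exact h
  have hst : stb_vorbis.stream s.mem (u.reg .rdi).toNat ≤ stb_vorbis.stream s_10c822r.mem (u.reg .rdi).toNat := by
    have h1 := hpost.stream_le.1
    have h2 : stb_vorbis.stream s_10c822.mem (u.reg .rdi).toNat = stb_vorbis.stream s.mem (u.reg .rdi).toNat := by
      apply stream_of_eqOn hf
      rw [w_mem_10c822]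
      u_eqon
    omega
  refine k s_10c822r w_rip (SpncMid.step N M ?_ w_rbx w_rsp (w_kept.mono_all (by rfl)) w_eq w_df w_mx hpost.reader.bits hst)
  u_same

/-- cut8 `0x10c827` (stb_vorbis_fixed.c:1492 `get32(f)` returned): the call of line 1494 `get8(f)`. -/
theorem seg8 (E : SpncEnv Lay μ u₀ others frames Blk len) (N : Ent Lay others frames Blk len u ret) (s : State)
    (hrip : s.rip = Vorbis.L.start_page_no_capturepattern.cut8) (M : SpncMid Blk len u₀ u s ret)
    (k : ∀ s', s'.rip = Vorbis.L.start_page_no_capturepattern.cut9 → SpncMid Blk len u₀ u s' ret →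
      SpncDone Lay μ u₀ others frames Blk len u ret s') :
    SpncDone Lay μ u₀ others frames Blk len u ret s := by
  obtain ⟨hLay, hμ, hcode, hload1, hgfo, hstore4, hget8, hstore1, hget32, hgetn, hload4, herror⟩ := E
  have ⟨he_ret_lt, he_align, he_room, he_top, he_stack, hrp, hpb⟩ := N
  have ⟨⟨m_rbx, m_rsp, m_kept, m_eq, m_same, m_un, m_s0, m_s1, m_s2, m_s3, m_s4, m_s5, m_df, m_mx⟩, m_bits, m_ns, m_st⟩ := M
  have hsh := hrp.shadow
  have hsp := hsh.rsp
  have hwhere := hrp.where_obj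
  show ReachVia _ _ _ _ _
  u_walk hcode [hμ.vendor] span [Vorbis.L.textLo, Vorbis.L.textHi] side (v_side)
  case call_inv => v_inv
  case pre_10c82a =>
    refine callee_pre N (by v_untouched) w_rsp w_rdi ?_
    rw [w_mem]
    exact bits_call N m_bits _
  -- after the return of get8: the invariant again
  v_after_call w_rsp_10c82a w_mem_10c82a
  have hf : (u.reg .rdi).toNat + 1808 ≤ 2 ^ 64 := by omega
  have hpost : Get8Post Blk len (u.reg .rdi).toNat s_10c82a s_10c82ar := by
    have h := w_post
    simp only [get8.spec, w_rdi_10c82a] at h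
    exact h
  have hst : stb_vorbis.stream s.mem (u.reg .rdi).toNat ≤ stb_vorbis.stream s_10c82ar.mem (u.reg .rdi).toNat := by
    have h1 := hpost.stream_le.1
    have h2 : stb_vorbis.stream s_10c82a.mem (u.reg .rdi).toNat = stb_vorbis.stream s.mem (u.reg .rdi).toNat := by
      apply stream_of_eqOn hf
      rw [w_mem_10c82a]
      u_eqon
    omega
  refine k s_10c82ar w_rip (SpncMid.step N M ?_ w_rbx w_rsp (w_kept.mono_all (by rfl)) w_eq w_df w_mx hpost.reader.bits hst)
  u_same

/-- cut9 `0x10c82f` (stb_vorbis_fixed.c:1494 `f->segment_count = get8(f)` returned): the checked store of `segment_count`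
at `f + 0x5d0`, then the call of line 1495 `getn(f, f->segments, f->segment_count)`. -/
theorem seg9 (E : SpncEnv Lay μ u₀ others frames Blk len) (N : Ent Lay others frames Blk len u ret) (s : State)
    (hrip : s.rip = Vorbis.L.start_page_no_capturepattern.cut9) (M : SpncMid Blk len u₀ u s ret)
    (k : ∀ s', s'.rip = Vorbis.L.start_page_no_capturepattern.cut10 → SpncMid Blk len u₀ u s' ret →
      SpncDone Lay μ u₀ others frames Blk len u ret s') :
    SpncDone Lay μ u₀ others frames Blk len u ret s := by
  obtain ⟨hLay, hμ, hcode, hload1, hgfo, hstore4, hget8, hstore1, hget32, hgetn, hload4, herror⟩ := E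
  have ⟨he_ret_lt, he_align, he_room, he_top, he_stack, hrp, hpb⟩ := N
  have ⟨⟨m_rbx, m_rsp, m_kept, m_eq, m_same, m_un, m_s0, m_s1, m_s2, m_s3, m_s4, m_s5, m_df, m_mx⟩, m_bits, m_ns, m_st⟩ := M
  have hsh := hrp.shadow
  have hsp := hsh.rsp
  have hwhere := hrp.where_obj
  have hobj := hrp.env.obj
  -- the byte, as the 32-bit value the walk stores and passes on
  obtain ⟨b, hbv, hb⟩ : ∃ b : BitVec 32, BitVec.zeroExtend 32 (Word.part .w8 (s.reg .rax)) = b ∧ b.toNat < 256 :=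
    ⟨_, rfl, zext8_lt _⟩
  have hbI := toInt_small b hb
  have hbA := argInt_small b hb
  have hf : (u.reg .rdi).toNat + 1808 ≤ 2 ^ 64 := by omega
  show ReachVia _ _ _ _ _
  u_walk hcode [hμ.vendor] span [Vorbis.L.textLo, Vorbis.L.textHi] side (v_side)
  case check_10c83a =>
    -- the store of `segment_count`: inside `*f`
    have hun : ShadowUntouched u.mem s_10c83a.mem := by v_untouched
    refine hobj.accSmall hsh.inv hun _ 4 (by decide) (by u_omega) ?_
    simp only [Vorbis.Off.sizeof.stb_vorbis]
    u_omega
  case call_inv => v_inv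
  case pre_10c853 =>
    rw [hbv] at w_rdx w_mem
    -- `Bits` in the memory of the call: the push of the check, the store of `segment_count`, the push of the call
    have hb1 := bits_call N m_bits 1099839
    have hns1 : stb_vorbis.next_seg (s.mem.writeLE (u.reg .rsp - 48) 8 1099839) (u.reg .rdi).toNat = -1 ∨
        stb_vorbis.next_seg (s.mem.writeLE (u.reg .rsp - 48) 8 1099839) (u.reg .rdi).toNat = 0 := by
      have e : stb_vorbis.next_seg (s.mem.writeLE (u.reg .rsp - 48) 8 1099839) (u.reg .rdi).toNat =
          stb_vorbis.next_seg s.mem (u.reg .rdi).toNat := by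
        apply ns_of_eqOn hf
        u_eqon
      rw [e, m_ns]
      exact hpb
    have hb2 := hb1.store_segment_count b (by omega) hns1
    have hb3 := bits_call N hb2.1 1099864
    have ea : u.reg .rdi + 1488 = addr ((u.reg .rdi).toNat + 1488) := fieldWord _ 1488 _ rfl
    have hbits : Bits Blk len s_10c853.mem (u.reg .rdi).toNat := by
      rw [w_mem, ea]
      exact hb3
    have hS1 := hbits.S1
    have hr := hbits.OBR
    simp only [voff] at hS1 hr
    have hn : (argInt (s_10c853.reg .rdx)).toNat = b.toNat := by
      rw [w_rdx, hbA]
      omega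
    have hrsi : (s_10c853.reg .rsi).toNat = (u.reg .rdi).toNat + 1492 := by
      rw [w_rsi]
      u_omega
    refine ⟨callee_pre N (by v_untouched) w_rsp w_rdi hbits, ?_, ?_, ?_⟩
    · rw [w_rdx, hbA]
      omega
    · rw [hn, hrsi]
      by_cases hb0 : b.toNat = 0
      · exact Or.inl hb0
      · right
        refine hobj.sub _ _ (by omega) ?_
        simp only [Vorbis.Off.sizeof.stb_vorbis]
        omega
    · rw [hn, hrsi, w_rdi]
      constructor
      · simp only [voff]
        omega
      · right
        right
        omega
  -- after the return of getn at cut10: the invariant again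
  rw [hbv] at w_rdx_10c853 w_mem_10c853
  v_after_call w_rsp_10c853 w_mem_10c853
  have hn : (argInt (Word.ofBV b)).toNat = b.toNat := by
    rw [hbA]
    omega
  have hrsi : (u.reg .rdi + 1492).toNat = (u.reg .rdi).toNat + 1492 := by u_omega
  simp only [w_rdi_10c853, w_rsi_10c853, w_rdx_10c853, hn, hrsi] at w_same
  have hpost : GetnPost Blk len (u.reg .rdi).toNat (u.reg .rdi + 1492).toNat (argInt (Word.ofBV b)) s_10c853 s_10c853r := by
    have h := w_post
    simp only [getn.spec, w_rdi_10c853, w_rsi_10c853, w_rdx_10c853] at h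
    exact h
  have hst : stb_vorbis.stream s.mem (u.reg .rdi).toNat ≤ stb_vorbis.stream s_10c853r.mem (u.reg .rdi).toNat := by
    have h1 := hpost.stream_le
    have h2 : stb_vorbis.stream s_10c853.mem (u.reg .rdi).toNat = stb_vorbis.stream s.mem (u.reg .rdi).toNat := by
      apply stream_of_eqOn hf
      rw [w_mem_10c853]
      u_eqon
    omega
  refine k s_10c853r w_rip (SpncMid.step N M ?_ w_rbx w_rsp (w_kept.mono_all (by rfl)) w_eq w_df w_mx hpost.reader.bits hst)
  u_same

/-- cut10 `0x10c858` (stb_vorbis_fixed.c:1495 `if (!getn(…))` returned): on 0 the call of `error(f, 10)`; else line 1498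
`f->end_seg_with_known_loc = -2` (checked store at `f + 0x6f0`), line 1499 `if (loc0 != ~0U || loc1 != ~0U)`: to the join
`0x10c8ee`, or the checked load of `segment_count` and `i = segment_count - 1` at the head of the loop of line 1502. -/
theorem seg10 (E : SpncEnv Lay μ u₀ others frames Blk len) (N : Ent Lay others frames Blk len u ret) (s : State)
    (hrip : s.rip = Vorbis.L.start_page_no_capturepattern.cut10) (M : SpncMid Blk len u₀ u s ret)
    (kerr : ∀ s', (s'.rip = Vorbis.L.start_page_no_capturepattern.cut12 ∨
        s'.rip = Vorbis.L.start_page_no_capturepattern.cut13) → SpncMid Blk len u₀ u s' ret → s'.reg .rax = 0 →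
      SpncDone Lay μ u₀ others frames Blk len u ret s')
    (kj : ∀ s', s'.rip = join1 → SpncMid Blk len u₀ u s' ret → EndSeg s'.mem (u.reg .rdi).toNat →
      SpncDone Lay μ u₀ others frames Blk len u ret s')
    (kl : ∀ s', s'.rip = Vorbis.L.start_page_no_capturepattern.loop1 → SpncMid Blk len u₀ u s' ret →
      EndSeg s'.mem (u.reg .rdi).toNat →
      (∃ x : BitVec 32, s'.reg .rbp = Word.ofBV x ∧ -1 ≤ x.toInt ∧
        x.toInt < stb_vorbis.segment_count s'.mem (u.reg .rdi).toNat) →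
      SpncDone Lay μ u₀ others frames Blk len u ret s') :
    SpncDone Lay μ u₀ others frames Blk len u ret s := by
  obtain ⟨hLay, hμ, hcode, hload1, hgfo, hstore4, hget8, hstore1, hget32, hgetn, hload4, herror⟩ := E
  have ⟨he_ret_lt, he_align, he_room, he_top, he_stack, hrp, hpb⟩ := N
  have ⟨⟨m_rbx, m_rsp, m_kept, m_eq, m_same, m_un, m_s0, m_s1, m_s2, m_s3, m_s4, m_s5, m_df, m_mx⟩, m_bits, m_ns, m_st⟩ := M
  have hsh := hrp.shadow
  have hsp := hsh.rsp
  have hwhere := hrp.where_obj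
  have hobj := hrp.env.obj
  have hf : (u.reg .rdi).toNat + 1808 ≤ 2 ^ 64 := by omega
  obtain ⟨c, r1488, hc, hsc⟩ := sc_read (u.reg .rdi) m_bits
  show ReachVia _ _ _ _ _
  u_walk hcode [hμ.vendor] until [join1, Vorbis.L.start_page_no_capturepattern.loop1] span [Vorbis.L.textLo, Vorbis.L.textHi] side (v_side)
  case call_inv => v_inv
  case pre_10c8ca =>
    refine ⟨callee_shadow N (by v_untouched) w_rsp, ?_⟩
    rw [w_rdi]
    exact hobj
  case check_10c863 =>
    -- the store of `end_seg_with_known_loc`: inside `*f`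
    have hun : ShadowUntouched u.mem s_10c863.mem := by v_untouched
    refine hobj.accSmall hsh.inv hun _ 4 (by decide) (by u_omega) ?_
    simp only [Vorbis.Off.sizeof.stb_vorbis]
    u_omega
  case check_10c881 =>
    -- the load of `segment_count`: inside `*f`
    have hun : ShadowUntouched u.mem s_10c881.mem := by v_untouched
    refine hobj.accSmall hsh.inv hun _ 4 (by decide) (by u_omega) ?_
    simp only [Vorbis.Off.sizeof.stb_vorbis]
    u_omega
  · -- getn returned 0: after the return of `error(f, 10)` at cut13: eax = 0, only `f->error` changed
    v_after_call w_rsp_10c8ca w_mem_10c8ca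
    have hrax : s_10c8car.reg .rax = 0 := w_post.1
    have hb : Bits Blk len s_10c8car.mem (u.reg .rdi).toNat := by
      refine m_bits.frame_fields ⟨?_, ?_, ?_, ?_⟩
      · u_eqon
      · u_eqon
      · u_eqon
      · u_eqon
    have hst : stb_vorbis.stream s.mem (u.reg .rdi).toNat ≤ stb_vorbis.stream s_10c8car.mem (u.reg .rdi).toNat := by
      refine Nat.le_of_eq (stream_of_eqOn hf ?_).symm
      u_eqon
    refine kerr s_10c8car (Or.inr w_rip) (SpncMid.step N M ?_ w_rbx w_rsp (w_kept.mono_all (by rfl)) w_eq w_df w_mx hb hst) hrax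
    u_same
  · -- `loc0 == ~0U && loc1 == ~0U`: at the join `0x10c8ee` with `end_seg_with_known_loc = -2`
    have hb : Bits Blk len s_10c878.mem (u.reg .rdi).toNat := by
      refine m_bits.frame_fields ⟨?_, ?_, ?_, ?_⟩
      · rw [w_mem]
        u_eqon
      · rw [w_mem]
        u_eqon
      · rw [w_mem]
        u_eqon
      · rw [w_mem]
        u_eqon
    have hst : stb_vorbis.stream s.mem (u.reg .rdi).toNat ≤ stb_vorbis.stream s_10c878.mem (u.reg .rdi).toNat := by
      refine Nat.le_of_eq (stream_of_eqOn hf ?_).symm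
      rw [w_mem]
      u_eqon
    have hdf : s_10c878.flags .df = false := by
      rw [w_flags]
      simp only [X86.User.df_setStatus]
      exact w_df_10c863
    have hmx : s_10c878.mxcsr &&& 0x1F80 = 0x1F80 := by
      rw [w_mxcsr]
      exact m_mx
    refine kj s_10c878 w_rip (SpncMid.step N M ?_ w_rbx w_rsp (w_kept.mono_all (by rfl)) w_eq hdf hmx hb hst) ?_
    · u_same
    · rw [w_mem]
      exact endSeg_stored _ _
  · -- at the head of the loop of line 1502: `i = segment_count - 1`, `end_seg_with_known_loc = -2`
    have hb : Bits Blk len s_10c88c.mem (u.reg .rdi).toNat := by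
      refine m_bits.frame_fields ⟨?_, ?_, ?_, ?_⟩
      · rw [w_mem]
        u_eqon
      · rw [w_mem]
        u_eqon
      · rw [w_mem]
        u_eqon
      · rw [w_mem]
        u_eqon
    have hst : stb_vorbis.stream s.mem (u.reg .rdi).toNat ≤ stb_vorbis.stream s_10c88c.mem (u.reg .rdi).toNat := by
      refine Nat.le_of_eq (stream_of_eqOn hf ?_).symm
      rw [w_mem]
      u_eqon
    have hdf : s_10c88c.flags .df = false := by
      rw [w_flags]
      exact w_df_10c881
    have hmx : s_10c88c.mxcsr &&& 0x1F80 = 0x1F80 := by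
      rw [w_mxcsr]
      exact m_mx
    have hsc' : stb_vorbis.segment_count s_10c88c.mem (u.reg .rdi).toNat = (c : Int) := by
      rw [← hsc]
      apply sc_of_eqOn hf
      rw [w_mem]
      u_eqon
    have hes : EndSeg s_10c88c.mem (u.reg .rdi).toNat := by
      refine (endSeg_stored (s.mem.writeLE (u.reg .rsp - 48) 8 1099880) (u.reg .rdi)).of_eqOn hf ?_ ?_
      · rw [w_mem]
        u_eqon
      · rw [w_mem]
        u_eqon
    refine kl s_10c88c w_rip (SpncMid.step N M ?_ w_rbx w_rsp (w_kept.mono_all (by rfl)) w_eq hdf hmx hb hst) hes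
      ⟨_, w_rbp, ?_, ?_⟩
    · u_same
    · rw [dec_toInt c hc]
      omega
    · rw [dec_toInt c hc, hsc']
      omega

/-- The loop of stb_vorbis_fixed.c:1502 `for (i = f->segment_count-1; i >= 0; --i) if (f->segments[i] < 255) break;` (head
`0x10c88f`), by induction on `i + 1`; then line 1506 `if (i >= 0) { f->end_seg_with_known_loc = i; f->known_loc_for_packet = loc0; }`
and the join `0x10c8ee`. -/
theorem seg11 (E : SpncEnv Lay μ u₀ others frames Blk len) (N : Ent Lay others frames Blk len u ret)
    (kj : ∀ s', s'.rip = join1 → SpncMid Blk len u₀ u s' ret → EndSeg s'.mem (u.reg .rdi).toNat →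
      SpncDone Lay μ u₀ others frames Blk len u ret s') :
    ∀ (n : Nat) (s : State), s.rip = Vorbis.L.start_page_no_capturepattern.loop1 → SpncMid Blk len u₀ u s ret →
      EndSeg s.mem (u.reg .rdi).toNat →
      (∃ x : BitVec 32, s.reg .rbp = Word.ofBV x ∧ -1 ≤ x.toInt ∧
        x.toInt < stb_vorbis.segment_count s.mem (u.reg .rdi).toNat ∧ (x.toInt + 1).toNat = n) →
      SpncDone Lay μ u₀ others frames Blk len u ret s := by
  obtain ⟨hLay, hμ, hcode, hload1, hgfo, hstore4, hget8, hstore1, hget32, hgetn, hload4, herror⟩ := E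
  have ⟨he_ret_lt, he_align, he_room, he_top, he_stack, hrp, hpb⟩ := N
  have hsh := hrp.shadow
  have hsp := hsh.rsp
  have hwhere := hrp.where_obj
  have hobj := hrp.env.obj
  have hf : (u.reg .rdi).toNat + 1808 ≤ 2 ^ 64 := by omega
  intro n
  induction n using Nat.strongRecOn with
  | ind n ih =>
    intro s hrip M hes hx
    obtain ⟨x, w_rbp0, xlo, xhi, xn⟩ := hx
    have ⟨⟨m_rbx, m_rsp, m_kept, m_eq, m_same, m_un, m_s0, m_s1, m_s2, m_s3, m_s4, m_s5, m_df, m_mx⟩, m_bits, m_ns, m_st⟩ := M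
    show ReachVia _ _ _ _ _
    u_walk hcode [hμ.vendor] until [join1, Vorbis.L.start_page_no_capturepattern.loop1] span [Vorbis.L.textLo, Vorbis.L.textHi] side (v_side)
    case check_10c8e2 =>
      -- the store of `known_loc_for_packet`: inside `*f`
      have hun : ShadowUntouched u.mem s_10c8e2.mem := by v_untouched
      refine hobj.accSmall hsh.inv hun _ 4 (by decide) (by u_omega) ?_
      simp only [Vorbis.Off.sizeof.stb_vorbis]
      u_omega
    case check_10c89e =>
      -- the load of `segments[i]`, `0 ≤ i < segment_count ≤ 255`: inside `*f`
      obtain ⟨hxi, hxn31⟩ := msb_false x hbr_10c891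
      have hN1 := m_bits.N1
      have hsx := toNat_sext32 x hxn31
      have hun : ShadowUntouched u.mem s_10c89e.mem := by v_untouched
      refine hobj.accSmall hsh.inv hun _ 1 (by decide) (by u_omega) ?_
      simp only [Vorbis.Off.sizeof.stb_vorbis]
      u_omega
    case check_10c8e2 =>
      -- the store of `known_loc_for_packet`: inside `*f`
      have hun : ShadowUntouched u.mem s_10c8e2.mem := by v_untouched
      refine hobj.accSmall hsh.inv hun _ 4 (by decide) (by u_omega) ?_
      simp only [Vorbis.Off.sizeof.stb_vorbis]
      u_omega
    · -- `i = -1`: the loop ended without a segment below 255; nothing was stored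
      have hdf : s_10c8d3.flags .df = false := by
        rw [w_flags]
        simp only [X86.User.df_setStatus]
        exact m_df
      have hmx : s_10c8d3.mxcsr &&& 0x1F80 = 0x1F80 := by
        rw [w_mxcsr]
        exact m_mx
      refine kj s_10c8d3 w_rip (SpncMid.step N M ?_ w_rbx w_rsp (w_kept.mono_all (by rfl)) w_eq hdf hmx ?_ ?_) ?_
      · rw [w_mem]
        exact Mem.SameExcept.refl _ _
      · rw [w_mem]
        exact m_bits
      · rw [w_mem]
        exact Nat.le_refl _
      · rw [w_mem]
        exact hes
    · -- infeasible: `i < 0` at the head, `i ≥ 0` at line 1506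
      rw [hbr_10c891] at hbr_10c8d3
      exact absurd hbr_10c8d3 (by decide)
    · -- infeasible: `i ≥ 0` at the head, `i < 0` at line 1506
      rw [hbr_10c891] at hbr_10c8d3
      exact absurd hbr_10c8d3 (by decide)
    · -- `segments[i] < 255`, `i ≥ 0`: `end_seg_with_known_loc = i`, `known_loc_for_packet = loc0`
      obtain ⟨hxi, hxn31⟩ := msb_false x hbr_10c891
      have hb : Bits Blk len s_10c8e7.mem (u.reg .rdi).toNat := by
        refine m_bits.frame_fields ⟨?_, ?_, ?_, ?_⟩
        · rw [w_mem]
          u_eqon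
        · rw [w_mem]
          u_eqon
        · rw [w_mem]
          u_eqon
        · rw [w_mem]
          u_eqon
      have hst : stb_vorbis.stream s.mem (u.reg .rdi).toNat ≤ stb_vorbis.stream s_10c8e7.mem (u.reg .rdi).toNat := by
        refine Nat.le_of_eq (stream_of_eqOn hf ?_).symm
        rw [w_mem]
        u_eqon
      have hdf : s_10c8e7.flags .df = false := by
        rw [w_flags]
        exact w_df_10c8e2
      have hmx : s_10c8e7.mxcsr &&& 0x1F80 = 0x1F80 := by
        rw [w_mxcsr]
        exact m_mx
      have hsc' : stb_vorbis.segment_count s_10c8e7.mem (u.reg .rdi).toNat =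
          stb_vorbis.segment_count s.mem (u.reg .rdi).toNat := by
        apply sc_of_eqOn hf
        rw [w_mem]
        u_eqon
      have hes' : stb_vorbis.end_seg_with_known_loc s_10c8e7.mem (u.reg .rdi).toNat = x.toInt := by
        rw [← endSeg_index (s.mem.writeLE (u.reg .rsp - 48) 8 1099939) (u.reg .rdi) x]
        apply es_of_eqOn hf
        rw [w_mem]
        u_eqon
      refine kj s_10c8e7 w_rip (SpncMid.step N M ?_ w_rbx w_rsp (w_kept.mono_all (by rfl)) w_eq hdf hmx hb hst) ?_
      · u_same
      · right
        rw [hes', hsc']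
        omega
    · -- the back edge: `--i`
      obtain ⟨hxi, hxn31⟩ := msb_false x hbr_10c891
      have hb : Bits Blk len s_10c8b1.mem (u.reg .rdi).toNat := by
        rw [w_mem]
        exact bits_call N m_bits _
      have hst : stb_vorbis.stream s.mem (u.reg .rdi).toNat ≤ stb_vorbis.stream s_10c8b1.mem (u.reg .rdi).toNat := by
        refine Nat.le_of_eq (stream_of_eqOn hf ?_).symm
        rw [w_mem]
        u_eqon
      have hdf : s_10c8b1.flags .df = false := by
        rw [w_flags]
        simp only [X86.User.df_setStatus]
        exact w_df_10c89e
      have hmx : s_10c8b1.mxcsr &&& 0x1F80 = 0x1F80 := by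
        rw [w_mxcsr]
        exact m_mx
      have hsc' : stb_vorbis.segment_count s_10c8b1.mem (u.reg .rdi).toNat =
          stb_vorbis.segment_count s.mem (u.reg .rdi).toNat := by
        apply sc_of_eqOn hf
        rw [w_mem]
        u_eqon
      have hes' : EndSeg s_10c8b1.mem (u.reg .rdi).toNat := by
        refine hes.of_eqOn hf ?_ ?_
        · rw [w_mem]
          u_eqon
        · rw [w_mem]
          u_eqon
      have hdec := sub_one_toInt x hbr_10c891
      refine ih (x.toInt).toNat (by omega) s_10c8b1 w_rip
        (SpncMid.step N M ?_ w_rbx w_rsp (w_kept.mono_all (by rfl)) w_eq hdf hmx hb hst) hes' ⟨_, w_rbp, ?_, ?_, ?_⟩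
      · u_same
      · omega
      · rw [hsc']
        omega
      · omega

/-- The join `0x10c8ee` (stb_vorbis_fixed.c:1511 `if (f->first_decode)`): the checked load at `f + 0x6d5`; with `first_decode`
`len = 0 ; i = 0` and the head of the loop of line 1514, else the join `0x10c907`. -/
theorem seg12 (E : SpncEnv Lay μ u₀ others frames Blk len) (N : Ent Lay others frames Blk len u ret) (s : State)
    (hrip : s.rip = join1) (M : SpncMid Blk len u₀ u s ret) (hes : EndSeg s.mem (u.reg .rdi).toNat)
    (kj : ∀ s', s'.rip = join2 → SpncMid Blk len u₀ u s' ret → EndSeg s'.mem (u.reg .rdi).toNat →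
      SpncDone Lay μ u₀ others frames Blk len u ret s')
    (kl : ∀ s', s'.rip = Vorbis.L.start_page_no_capturepattern.loop2 → SpncMid Blk len u₀ u s' ret →
      EndSeg s'.mem (u.reg .rdi).toNat → s'.reg .rbp = Word.ofBV 0#32 →
      SpncDone Lay μ u₀ others frames Blk len u ret s') :
    SpncDone Lay μ u₀ others frames Blk len u ret s := by
  obtain ⟨hLay, hμ, hcode, hload1, hgfo, hstore4, hget8, hstore1, hget32, hgetn, hload4, herror⟩ := E
  have ⟨he_ret_lt, he_align, he_room, he_top, he_stack, hrp, hpb⟩ := N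
  have ⟨⟨m_rbx, m_rsp, m_kept, m_eq, m_same, m_un, m_s0, m_s1, m_s2, m_s3, m_s4, m_s5, m_df, m_mx⟩, m_bits, m_ns, m_st⟩ := M
  have hsh := hrp.shadow
  have hsp := hsh.rsp
  have hwhere := hrp.where_obj
  have hobj := hrp.env.obj
  have hf : (u.reg .rdi).toNat + 1808 ≤ 2 ^ 64 := by omega
  show ReachVia _ _ _ _ _
  u_walk hcode [hμ.vendor] until [join2, Vorbis.L.start_page_no_capturepattern.loop2] span [Vorbis.L.textLo, Vorbis.L.textHi] side (v_side)
  case check_10c8f5 =>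
    -- the load of `first_decode`: inside `*f`
    have hun : ShadowUntouched u.mem s_10c8f5.mem := by v_untouched
    refine hobj.accSmall hsh.inv hun _ 1 (by decide) (by u_omega) ?_
    simp only [Vorbis.Off.sizeof.stb_vorbis]
    u_omega
  · -- `first_decode ≠ 0`: `len = 0`, `i = 0`, the head of the loop of line 1514
    have hb : Bits Blk len s_10c99a.mem (u.reg .rdi).toNat := by
      rw [w_mem]
      exact bits_call N m_bits _
    have hst : stb_vorbis.stream s.mem (u.reg .rdi).toNat ≤ stb_vorbis.stream s_10c99a.mem (u.reg .rdi).toNat := by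
      refine Nat.le_of_eq (stream_of_eqOn hf ?_).symm
      rw [w_mem]
      u_eqon
    have hdf : s_10c99a.flags .df = false := by
      rw [w_flags]
      simp only [X86.User.df_setStatus]
      exact w_df_10c8f5
    have hmx : s_10c99a.mxcsr &&& 0x1F80 = 0x1F80 := by
      rw [w_mxcsr]
      exact m_mx
    have hes' : EndSeg s_10c99a.mem (u.reg .rdi).toNat := by
      refine hes.of_eqOn hf ?_ ?_
      · rw [w_mem]
        u_eqon
      · rw [w_mem]
        u_eqon
    refine kl s_10c99a w_rip (SpncMid.step N M ?_ w_rbx w_rsp (w_kept.mono_all (by rfl)) w_eq hdf hmx hb hst) hes' w_rbp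
    u_same
  · -- `first_decode = 0`: the join `0x10c907`
    have hb : Bits Blk len s_10c901.mem (u.reg .rdi).toNat := by
      rw [w_mem]
      exact bits_call N m_bits _
    have hst : stb_vorbis.stream s.mem (u.reg .rdi).toNat ≤ stb_vorbis.stream s_10c901.mem (u.reg .rdi).toNat := by
      refine Nat.le_of_eq (stream_of_eqOn hf ?_).symm
      rw [w_mem]
      u_eqon
    have hdf : s_10c901.flags .df = false := by
      rw [w_flags]
      simp only [X86.User.df_setStatus]
      exact w_df_10c8f5
    have hmx : s_10c901.mxcsr &&& 0x1F80 = 0x1F80 := by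
      rw [w_mxcsr]
      exact m_mx
    have hes' : EndSeg s_10c901.mem (u.reg .rdi).toNat := by
      refine hes.of_eqOn hf ?_ ?_
      · rw [w_mem]
        u_eqon
      · rw [w_mem]
        u_eqon
    refine kj s_10c901 w_rip (SpncMid.step N M ?_ w_rbx w_rsp (w_kept.mono_all (by rfl)) w_eq hdf hmx hb hst) hes'
    u_same

/-- The loop of stb_vorbis_fixed.c:1514 `for (i = 0; i < f->segment_count; ++i) len += f->segments[i];` (head `0x10c94a`, the
bound re-read each round), by induction on `segment_count - i`; then lines 1516–1518 (the checked stores of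
`p_first.page_end`, `p_first.last_decoded_sample`) and the join `0x10c907`. -/
theorem seg13 (E : SpncEnv Lay μ u₀ others frames Blk len) (N : Ent Lay others frames Blk len u ret)
    (kj : ∀ s', s'.rip = join2 → SpncMid Blk len u₀ u s' ret → EndSeg s'.mem (u.reg .rdi).toNat →
      SpncDone Lay μ u₀ others frames Blk len u ret s') :
    ∀ (n : Nat) (s : State), s.rip = Vorbis.L.start_page_no_capturepattern.loop2 → SpncMid Blk len u₀ u s ret →
      EndSeg s.mem (u.reg .rdi).toNat →
      (∃ x : BitVec 32, s.reg .rbp = Word.ofBV x ∧ x.msb = false ∧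
        (x.toNat : Int) ≤ stb_vorbis.segment_count s.mem (u.reg .rdi).toNat ∧
        (stb_vorbis.segment_count s.mem (u.reg .rdi).toNat - (x.toNat : Int)).toNat = n) →
      SpncDone Lay μ u₀ others frames Blk len u ret s := by
  obtain ⟨hLay, hμ, hcode, hload1, hgfo, hstore4, hget8, hstore1, hget32, hgetn, hload4, herror⟩ := E
  have ⟨he_ret_lt, he_align, he_room, he_top, he_stack, hrp, hpb⟩ := N
  have hsh := hrp.shadow
  have hsp := hsh.rsp
  have hwhere := hrp.where_obj
  have hobj := hrp.env.obj
  have hf : (u.reg .rdi).toNat + 1808 ≤ 2 ^ 64 := by omega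
  intro n
  induction n using Nat.strongRecOn with
  | ind n ih =>
    intro s hrip M hes hx
    obtain ⟨x, w_rbp0, xpos, xle, xn⟩ := hx
    have ⟨⟨m_rbx, m_rsp, m_kept, m_eq, m_same, m_un, m_s0, m_s1, m_s2, m_s3, m_s4, m_s5, m_df, m_mx⟩, m_bits, m_ns, m_st⟩ := M
    obtain ⟨c, r1488, hc, hsc⟩ := sc_read (u.reg .rdi) m_bits
    show ReachVia _ _ _ _ _
    u_walk hcode [hμ.vendor] until [join2, Vorbis.L.start_page_no_capturepattern.loop2] span [Vorbis.L.textLo, Vorbis.L.textHi] side (v_side)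
    case check_10c951 =>
      -- the load of `segment_count`: inside `*f`
      have hun : ShadowUntouched u.mem s_10c951.mem := by v_untouched
      refine hobj.accSmall hsh.inv hun _ 4 (by decide) (by u_omega) ?_
      simp only [Vorbis.Off.sizeof.stb_vorbis]
      u_omega
    case check_10c936 =>
      -- the load of `segments[i]`, `0 ≤ i < segment_count ≤ 255`: inside `*f`
      obtain ⟨hxi, hxn31⟩ := msb_false x xpos
      have hci := ofNat_toInt c hc
      have hsx := toNat_sext32 x hxn31
      have hun : ShadowUntouched u.mem s_10c936.mem := by v_untouched
      refine hobj.accSmall hsh.inv hun _ 1 (by decide) (by u_omega) ?_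
      simp only [Vorbis.Off.sizeof.stb_vorbis]
      u_omega
    case check_10c969 =>
      -- the load of `p_first.page_start`: inside `*f`
      have hun : ShadowUntouched u.mem s_10c969.mem := by v_untouched
      refine hobj.accSmall hsh.inv hun _ 4 (by decide) (by u_omega) ?_
      simp only [Vorbis.Off.sizeof.stb_vorbis]
      u_omega
    case check_10c975 =>
      -- the store of `p_first.page_end`: inside `*f`
      have hun : ShadowUntouched u.mem s_10c975.mem := by v_untouched
      refine hobj.accSmall hsh.inv hun _ 4 (by decide) (by u_omega) ?_
      simp only [Vorbis.Off.sizeof.stb_vorbis]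
      u_omega
    case check_10c981 =>
      -- the store of `p_first.last_decoded_sample`: inside `*f`
      have hun : ShadowUntouched u.mem s_10c981.mem := by v_untouched
      refine hobj.accSmall hsh.inv hun _ 4 (by decide) (by u_omega) ?_
      simp only [Vorbis.Off.sizeof.stb_vorbis]
      u_omega
    · -- the back edge: `len += f->segments[i]; ++i`
      obtain ⟨hxi, hxn31⟩ := msb_false x xpos
      have hci := ofNat_toInt c hc
      obtain ⟨hinc1, hinc2⟩ := add_one_toInt x (by omega)
      have hb : Bits Blk len s_10c947.mem (u.reg .rdi).toNat := by
        rw [w_mem]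
        exact bits_call N m_bits _
      have hst : stb_vorbis.stream s.mem (u.reg .rdi).toNat ≤ stb_vorbis.stream s_10c947.mem (u.reg .rdi).toNat := by
        refine Nat.le_of_eq (stream_of_eqOn hf ?_).symm
        rw [w_mem]
        u_eqon
      have hdf : s_10c947.flags .df = false := by
        rw [w_flags]
        simp only [X86.User.df_setStatus]
        exact w_df_10c936
      have hmx : s_10c947.mxcsr &&& 0x1F80 = 0x1F80 := by
        rw [w_mxcsr]
        exact m_mx
      have hsc' : stb_vorbis.segment_count s_10c947.mem (u.reg .rdi).toNat =
          stb_vorbis.segment_count s.mem (u.reg .rdi).toNat := by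
        apply sc_of_eqOn hf
        rw [w_mem]
        u_eqon
      have hes' : EndSeg s_10c947.mem (u.reg .rdi).toNat := by
        refine hes.of_eqOn hf ?_ ?_
        · rw [w_mem]
          u_eqon
        · rw [w_mem]
          u_eqon
      refine ih (c - (x.toNat + 1)) (by omega) s_10c947 w_rip
        (SpncMid.step N M ?_ w_rbx w_rsp (w_kept.mono_all (by rfl)) w_eq hdf hmx hb hst) hes' ⟨_, w_rbp, hinc1, ?_, ?_⟩
      · u_same
      · rw [hsc', hinc2]
        omega
      · rw [hsc', hinc2]
        omega
    · -- the exit: lines 1516–1518, the two stores into `p_first`, then the join `0x10c907`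
      have hb : Bits Blk len s_10c98a.mem (u.reg .rdi).toNat := by
        refine m_bits.frame_fields ⟨?_, ?_, ?_, ?_⟩
        · rw [w_mem]
          u_eqon
        · rw [w_mem]
          u_eqon
        · rw [w_mem]
          u_eqon
        · rw [w_mem]
          u_eqon
      have hst : stb_vorbis.stream s.mem (u.reg .rdi).toNat ≤ stb_vorbis.stream s_10c98a.mem (u.reg .rdi).toNat := by
        refine Nat.le_of_eq (stream_of_eqOn hf ?_).symm
        rw [w_mem]
        u_eqon
      have hdf : s_10c98a.flags .df = false := by
        rw [w_flags]
        exact w_df_10c981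
      have hmx : s_10c98a.mxcsr &&& 0x1F80 = 0x1F80 := by
        rw [w_mxcsr]
        exact m_mx
      have hes' : EndSeg s_10c98a.mem (u.reg .rdi).toNat := by
        refine hes.of_eqOn hf ?_ ?_
        · rw [w_mem]
          u_eqon
        · rw [w_mem]
          u_eqon
      refine kj s_10c98a w_rip (SpncMid.step N M ?_ w_rbx w_rsp (w_kept.mono_all (by rfl)) w_eq hdf hmx hb hst) hes'
      u_same

/-- The join `0x10c907` (stb_vorbis_fixed.c:1520 `f->next_seg = 0`): the checked store at `f + 0x6d8`, `mov eax, 1`, and the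
invariant `Exit` of the exit join. -/
theorem seg14 (E : SpncEnv Lay μ u₀ others frames Blk len) (N : Ent Lay others frames Blk len u ret) (s : State)
    (hrip : s.rip = join2) (M : SpncMid Blk len u₀ u s ret) (hes : EndSeg s.mem (u.reg .rdi).toNat)
    (k : ∀ s', s'.rip = join3 → Exit Blk len u₀ u s' ret → SpncDone Lay μ u₀ others frames Blk len u ret s') :
    SpncDone Lay μ u₀ others frames Blk len u ret s := by
  obtain ⟨hLay, hμ, hcode, hload1, hgfo, hstore4, hget8, hstore1, hget32, hgetn, hload4, herror⟩ := E
  have ⟨he_ret_lt, he_align, he_room, he_top, he_stack, hrp, hpb⟩ := N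
  have ⟨⟨m_rbx, m_rsp, m_kept, m_eq, m_same, m_un, m_s0, m_s1, m_s2, m_s3, m_s4, m_s5, m_df, m_mx⟩, m_bits, m_ns, m_st⟩ := M
  have hsh := hrp.shadow
  have hsp := hsh.rsp
  have hwhere := hrp.where_obj
  have hobj := hrp.env.obj
  show ReachVia _ _ _ _ _
  u_walk hcode [hμ.vendor] until [join3] span [Vorbis.L.textLo, Vorbis.L.textHi] side (v_side)
  case check_10c90e =>
    -- the store of `next_seg`: inside `*f`
    have hun : ShadowUntouched u.mem s_10c90e.mem := by v_untouched
    refine hobj.accSmall hsh.inv hun _ 4 (by decide) (by u_omega) ?_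
    simp only [Vorbis.Off.sizeof.stb_vorbis]
    u_omega
  -- at the exit join: the invariant `Exit`
  have hf : (u.reg .rdi).toNat + 1808 ≤ 2 ^ 64 := by omega
  have hb1 := bits_call N m_bits 1100051
  have hb2 := hb1.store_next_seg (0#32) (Or.inr (Or.inl rfl))
  have ea : u.reg .rdi + 1752 = addr ((u.reg .rdi).toNat + 1752) := fieldWord _ 1752 _ rfl
  have hdf : s_10c91d.flags .df = false := by
    rw [w_flags]
    exact w_df_10c90e
  have hmx : s_10c91d.mxcsr &&& 0x1F80 = 0x1F80 := by
    rw [w_mxcsr]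
    exact m_mx
  have hrax : s_10c91d.reg .rax = 1 := w_rax
  refine k s_10c91d w_rip ⟨Frm.step N M.frm ?_ w_rbx w_rsp (w_kept.mono_all (by rfl)) w_eq hdf hmx, ?_, ?_, Or.inr hrax, ?_, ?_⟩
  · u_same
  · rw [w_mem, ea]
    exact hb2.1
  · refine Nat.le_trans m_st (Nat.le_of_eq (stream_of_eqOn hf ?_).symm)
    rw [w_mem]
    u_eqon
  · intro _
    constructor
    · rw [w_mem, ea]
      exact hb2.2
    · refine hes.of_eqOn hf ?_ ?_
      · rw [w_mem]
        u_eqon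
      · rw [w_mem]
        u_eqon
  · intro h0
    rw [hrax] at h0
    exact absurd h0 (by decide)

/-- cut12 `0x10c8c0` / cut13 `0x10c8cf` (stb_vorbis_fixed.c:1478, 1496: `error(f, …)` returned 0): `jmp 10c922`, and the
invariant `Exit` of the exit join with eax = 0 (`next_seg` is what it was). -/
theorem segerr (E : SpncEnv Lay μ u₀ others frames Blk len) (N : Ent Lay others frames Blk len u ret) (s : State)
    (hrip : s.rip = Vorbis.L.start_page_no_capturepattern.cut12 ∨ s.rip = Vorbis.L.start_page_no_capturepattern.cut13)
    (M : SpncMid Blk len u₀ u s ret) (hrax : s.reg .rax = 0)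
    (kx : ∀ s', s'.rip = join3 → Exit Blk len u₀ u s' ret → SpncDone Lay μ u₀ others frames Blk len u ret s') :
    SpncDone Lay μ u₀ others frames Blk len u ret s := by
  obtain ⟨hLay, hμ, hcode, hload1, hgfo, hstore4, hget8, hstore1, hget32, hgetn, hload4, herror⟩ := E
  have ⟨he_ret_lt, he_align, he_room, he_top, he_stack, hrp, hpb⟩ := N
  have ⟨⟨m_rbx, m_rsp, m_kept, m_eq, m_same, m_un, m_s0, m_s1, m_s2, m_s3, m_s4, m_s5, m_df, m_mx⟩, m_bits, m_ns, m_st⟩ := M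
  have hsh := hrp.shadow
  have hsp := hsh.rsp
  have hwhere := hrp.where_obj
  -- the tail is the same from both error returns
  have htail : ∀ s', s'.rip = join3 → s'.mem = s.mem → s'.reg .rax = 0 → s'.reg .rbx = u.reg .rdi →
      s'.reg .rsp = u.reg .rsp - 40 → RegsKept [.rdi, .rbx, .rsp, .rax, .rdx, .rcx, .rsi, .r8, .r9, .r10, .r11, .r16, .r17,
        .r18, .r19, .r20, .r21, .r22, .r23, .r24, .r25, .r26, .r27, .r28, .r29, .r30, .r31, .rbp, .r12, .r13, .r14] u s' →
      Mem.EqOn Vorbis.L.textLo Vorbis.L.textHi u₀.mem s'.mem → s'.flags = s.flags → s'.mxcsr = s.mxcsr →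
      SpncDone Lay μ u₀ others frames Blk len u ret s' := by
    intro s' w_rip w_mem w_rax w_rbx w_rsp w_kept w_eq w_flags w_mxcsr
    have hdf : s'.flags .df = false := by
      rw [w_flags]
      exact m_df
    have hmx : s'.mxcsr &&& 0x1F80 = 0x1F80 := by
      rw [w_mxcsr]
      exact m_mx
    refine kx s' w_rip ⟨Frm.step N M.frm ?_ w_rbx w_rsp w_kept w_eq hdf hmx, ?_, ?_, Or.inl w_rax, ?_, ?_⟩
    · rw [w_mem]
      exact Mem.SameExcept.refl _ _
    · rw [w_mem]
      exact m_bits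
    · rw [w_mem]
      exact m_st
    · intro h1
      rw [w_rax] at h1
      exact absurd h1 (by decide)
    · intro _
      rw [w_mem]
      exact m_ns
  show ReachVia _ _ _ _ _
  rcases hrip with hrip | hrip
  · u_walk hcode [hμ.vendor] until [join3] span [Vorbis.L.textLo, Vorbis.L.textHi] side (v_side)
    exact htail _ w_rip w_mem w_rax w_rbx w_rsp w_kept w_eq w_flags w_mxcsr
  · u_walk hcode [hμ.vendor] until [join3] span [Vorbis.L.textLo, Vorbis.L.textHi] side (v_side)
    exact htail _ w_rip w_mem w_rax w_rbx w_rsp w_kept w_eq w_flags w_mxcsr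

/-- The exit join `0x10c922` (stb_vorbis_fixed.c:1522 `}`): `pop rbx ; pop rbp ; pop r12 ; pop r13 ; pop r14 ; ret`, and the
contract's `Returned` from the invariant `Exit`. -/
theorem seg15 (E : SpncEnv Lay μ u₀ others frames Blk len) (N : Ent Lay others frames Blk len u ret) (s : State)
    (hrip : s.rip = join3) (X : Exit Blk len u₀ u s ret) :
    SpncDone Lay μ u₀ others frames Blk len u ret s := by
  obtain ⟨hLay, hμ, hcode, hload1, hgfo, hstore4, hget8, hstore1, hget32, hgetn, hload4, herror⟩ := E
  have ⟨he_ret_lt, he_align, he_room, he_top, he_stack, hrp, hpb⟩ := N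
  have ⟨⟨m_rbx, m_rsp, m_kept, m_eq, m_same, m_un, m_s0, m_s1, m_s2, m_s3, m_s4, m_s5, m_df, m_mx⟩, m_bits, m_st, m_res,
    m_started, m_failed⟩ := X
  have hsh := hrp.shadow
  have hsp := hsh.rsp
  have hwhere := hrp.where_obj
  obtain ⟨z, hz⟩ : ∃ z, s.reg .rax = z := ⟨_, rfl⟩
  rw [hz] at m_res m_started m_failed
  show ReachVia _ _ _ _ _
  u_walk hcode [hμ.vendor] span [Vorbis.L.textLo, Vorbis.L.textHi] side (v_side)
  refine ReachVia.done ?_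
  v_returned
  -- the post, about the memory of the exit join (the pops write nothing) and its rax
  show PageNoCapturePost Blk len (u.reg .rdi).toNat u s_10c92a
  have hf : (u.reg .rdi).toNat + 1808 ≤ 2 ^ 64 := by omega
  rw [← w_rax] at m_res m_started m_failed
  rw [← w_mem] at m_same m_un m_bits m_st m_started m_failed
  refine ⟨m_un, m_bits, m_res, m_st, ?_, m_started, m_failed⟩
  refine Reader.spnc_bound m_bits m_same ?_ m_st
  intro w hw
  simp only [List.mem_cons, List.mem_nil_iff, or_false] at hw
  rcases hw with rfl | rfl | rfl | rfl | rfl | rfl | rfl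
  all_goals simp only []
  all_goals omega

end Vorbis.Spec.start_page_no_capturepattern

open Vorbis.Spec.start_page_no_capturepattern

/-- `start_page_no_capturepattern` satisfies its contract: the segments of this file, plugged together from the exit join
backwards (each `k…` is "from every state at that cut point with the invariant, the function returns as the contract says"). -/
theorem Vorbis.Spec.Worked.start_page_no_capturepattern_ok : Vorbis.Spec.start_page_no_capturepattern.Statement := by
  unfold Vorbis.Spec.start_page_no_capturepattern.Statement
  intro Lay hLay μ hμ u₀ hcode hload1 hgfo hstore4 hget8 hstore1 hget32 hgetn hload4 herror others frames Blk len u ret he hpre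
  v_entry he
  obtain ⟨hrp, hpb⟩ := hpre
  have E : SpncEnv Lay μ u₀ others frames Blk len :=
    ⟨hLay, hμ, hcode, hload1, hgfo others frames, hstore4, hget8 others frames Blk len, hstore1,
      hget32 others frames Blk len, hgetn others frames Blk len, hload4, herror others frames⟩
  have N : Ent Lay others frames Blk len u ret := ⟨he_ret_lt, he_align, he_room, he_top, he_stack, hrp, hpb⟩
  -- the exit join 0x10c922, and the two error returns (cut12, cut13)
  have kx : ∀ s', s'.rip = join3 → Exit Blk len u₀ u s' ret → SpncDone Lay μ u₀ others frames Blk len u ret s' :=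
    fun s' h X => seg15 E N s' h X
  have kerr := fun s' h M h0 => segerr (u₀ := u₀) E N s' h M h0 kx
  -- the join 0x10c907 and the loop of line 1514
  have kj2 := fun s' h M hes => seg14 (u₀ := u₀) E N s' h M hes kx
  have kl2 := seg13 (u₀ := u₀) E N kj2
  -- the join 0x10c8ee and the loop of line 1502
  have kj1 : ∀ s', s'.rip = join1 → SpncMid Blk len u₀ u s' ret → EndSeg s'.mem (u.reg .rdi).toNat →
      SpncDone Lay μ u₀ others frames Blk len u ret s' := by
    intro s' h M hes
    refine seg12 E N s' h M hes kj2 ?_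
    intro s'' h' M' hes' hbp
    exact kl2 _ s'' h' M' hes' ⟨0#32, hbp, by decide, M'.bits.N1.1, rfl⟩
  have kl1 := seg11 (u₀ := u₀) E N kj1
  -- the straight part, backwards from cut10 to the entry
  have k10 : ∀ s', s'.rip = Vorbis.L.start_page_no_capturepattern.cut10 → SpncMid Blk len u₀ u s' ret →
      SpncDone Lay μ u₀ others frames Blk len u ret s' := by
    intro s' h M
    refine seg10 E N s' h M kerr kj1 ?_
    intro s'' h' M' hes' hx
    obtain ⟨x, h1, h2, h3⟩ := hx
    exact kl1 _ s'' h' M' hes' ⟨x, h1, h2, h3, rfl⟩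
  have k9 := fun s' h M => seg9 (u₀ := u₀) E N s' h M k10
  have k8 := fun s' h M => seg8 (u₀ := u₀) E N s' h M k9
  have k7 := fun s' h M => seg7 (u₀ := u₀) E N s' h M k8
  have k6 := fun s' h M => seg6 (u₀ := u₀) E N s' h M k7
  have k5 := fun s' h M => seg5 (u₀ := u₀) E N s' h M k6
  have k4 := fun s' h M => seg4 (u₀ := u₀) E N s' h M k5
  have k3 := fun s' h M => seg3 (u₀ := u₀) E N s' h M k4
  have k2 := fun s' h M => seg2 (u₀ := u₀) E N s' h M k3 kerr
  have k1 := fun s' h M => seg1 (u₀ := u₀) E N s' h M k2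
  have k0 := fun s' h M => seg0b (u₀ := u₀) E N s' h M k1 k2
  exact seg0a E N he_rip he_retAddr he_eq he_df he_mx k0
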